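-- pv_equiv track=rewrite | github.com/TilenKelc/vaje_10_UvR | covid19.py | okuzeni
-- ===== SOURCE A (Python) =====
-- def okuzeni(skupine, nosilci):
--     okuzeni = []
--     if len(nosilci) == 0:
--         return set(okuzeni)
--     for skupina in skupine:
--
--         for nosilec in nosilci:
--             if nosilec in skupina:
--                 okuzeni += skupina
--
--     return set(okuzeni).difference(nosilci)
-- ===== SOURCE B (Python) =====
-- def okuzeni(skupine, nosilci):
--     if len(nosilci) == 0:
--         return set()
--     # inverted index: person -> list of indices of groups containing that person
--     index = {}
--     for i, skupina in enumerate(skupine):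
--         for clan in skupina:
--             index.setdefault(clan, []).append(i)
--     # indices of groups containing at least one carrier
--     hit = set()
--     for nosilec in nosilci:
--         hit.update(index.get(nosilec, []))
--     result = set()
--     for i in sorted(hit):
--         result.update(skupine[i])
--     return result.difference(nosilci)
-- ===== Notes on version B (the rewrite author's own statement) =====
-- stated objective: alternative
-- what changed: B builds an inverted index from each person to the indices of the groups containing them, collects the hit-group indices by looking the carriers up in that index, and unions those groups, instead of A's nested scan of every group against every carrier with repeated list concatenation.
import Mathlib
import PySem

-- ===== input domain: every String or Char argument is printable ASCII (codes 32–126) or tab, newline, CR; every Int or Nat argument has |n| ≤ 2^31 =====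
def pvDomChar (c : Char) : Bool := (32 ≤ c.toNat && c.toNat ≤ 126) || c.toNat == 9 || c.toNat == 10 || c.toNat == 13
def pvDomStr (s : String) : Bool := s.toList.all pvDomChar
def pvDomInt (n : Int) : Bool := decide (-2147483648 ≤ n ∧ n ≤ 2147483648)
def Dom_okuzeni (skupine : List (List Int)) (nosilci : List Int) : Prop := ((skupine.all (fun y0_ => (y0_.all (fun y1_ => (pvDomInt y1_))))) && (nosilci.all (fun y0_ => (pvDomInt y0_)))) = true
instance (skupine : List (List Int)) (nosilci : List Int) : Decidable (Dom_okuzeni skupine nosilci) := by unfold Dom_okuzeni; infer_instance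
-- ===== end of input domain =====

-- B replaces A's nested scan (every group against every carrier, with repeated list
-- concatenation) by an inverted index person -> group indices, built in one pass, then
-- looked up per carrier (a different algorithm of similar overall cost).

-- ===== PORT A =====
def okuzeni (skupine : List (List Int)) (nosilci : List Int) : List Int :=
  let ok : List Int := []
  if nosilci.length == 0 then PySem.Set.ofList ok
  else
    let ok := skupine.foldl (fun acc skupina =>
      nosilci.foldl (fun acc2 nosilec =>
        if skupina.contains nosilec then acc2 ++ skupina else acc2) acc) ok
    PySem.Set.diff (PySem.Set.ofList ok) nosilci

-- ===== PORT B =====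
def okuzeni_alt (skupine : List (List Int)) (nosilci : List Int) : List Int :=
  if nosilci.length == 0 then PySem.Set.empty
  else
    let index : PySem.Dict Int (List Int) :=
      (PySem.List.enumerate skupine).foldl (fun d p =>
        p.2.foldl (fun d2 clan => d2.insert clan (d2.getD clan [] ++ [p.1])) d)
        PySem.Dict.empty
    let hit : PySem.Set Int :=
      nosilci.foldl (fun h nosilec => PySem.Set.update h (index.getD nosilec [])) PySem.Set.empty
    let result : PySem.Set Int :=
      (PySem.List.sorted hit (fun x => x) false).foldl
        (fun r i => PySem.Set.update r ((PySem.List.pyGet? skupine i).getD []))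
        PySem.Set.empty
    -- skupine[i]: every i in hit is a valid index by construction, so pyGet?.getD [] is exact
    PySem.Set.diff result nosilci

-- ===== PRECONDITION & SPEC =====
def Spec_okuzeni (skupine : List (List Int)) (nosilci : List Int) (out : List Int) : Prop := out = okuzeni_alt skupine nosilci
instance (skupine : List (List Int)) (nosilci : List Int) (out : List Int) : Decidable (Spec_okuzeni skupine nosilci out) := by unfold Spec_okuzeni; infer_instance

-- ===== CLAIM (what is proved, stated in full; the proofs are below) =====
def Claim_equal_okuzeni : Prop := ∀ (skupine : List (List Int)) (nosilci : List Int), Dom_okuzeni skupine nosilci → Spec_okuzeni skupine nosilci (okuzeni skupine nosilci)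

-- ===== LEMMAS AND PROOFS =====

-- abbreviation used only in the proofs below
def buildIndex (skupine : List (List Int)) : PySem.Dict Int (List Int) :=
  (PySem.List.enumerate skupine).foldl (fun d p =>
    p.2.foldl (fun d2 clan => d2.insert clan (d2.getD clan [] ++ [p.1])) d)
    PySem.Dict.empty

-- A-side: set of A's accumulated list, as a foldl over the groups
theorem update_idem (s g : List Int) :
    PySem.Set.update (PySem.Set.update s g) g = PySem.Set.update s g := by
  rw [PySem.Set.update_eq_append_filter (s := PySem.Set.update s g)]
  have h : (PySem.Set.ofList g).filter
      (fun y => !(PySem.Set.contains (PySem.Set.update s g) y)) = [] := by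
    apply List.filter_eq_nil_iff.mpr
    intro y hy
    have hmem : y ∈ PySem.Set.update s g :=
      (PySem.Set.mem_update _ _ _).mpr (Or.inr ((PySem.Set.mem_ofList _ _).mp hy))
    simp [hmem]
  rw [h, List.append_nil]

theorem inner_loop (g : List Int) (nos : List Int) (acc : List Int) :
    PySem.Set.ofList (nos.foldl (fun a n => if g.contains n then a ++ g else a) acc)
      = if nos.any (fun n => g.contains n)
        then PySem.Set.update (PySem.Set.ofList acc) g
        else PySem.Set.ofList acc := by
  induction nos generalizing acc with
  | nil => simp
  | cons n ns ih =>
    simp only [List.foldl_cons, List.any_cons]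
    by_cases h : g.contains n = true
    · rw [if_pos h, ih]
      simp only [h, Bool.true_or]
      by_cases h2 : ns.any (fun n => g.contains n) = true
      · rw [if_pos h2, PySem.Set.ofList_append, update_idem, if_pos trivial]
      · rw [if_neg h2, PySem.Set.ofList_append, if_pos trivial]
    · have h' : g.contains n = false := Bool.eq_false_iff.mpr h
      simp only [h', Bool.false_eq_true, if_false, Bool.false_or, ih]

theorem outer_loop (sk : List (List Int)) (nos : List Int) (acc : List Int) :
    PySem.Set.ofList (sk.foldl (fun a g =>
        nos.foldl (fun a2 n => if g.contains n then a2 ++ g else a2) a) acc)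
      = sk.foldl (fun r g =>
          if g.any (fun c => nos.contains c)
          then PySem.Set.update r g else r) (PySem.Set.ofList acc) := by
  induction sk generalizing acc with
  | nil => rfl
  | cons g gs ih =>
    simp only [List.foldl_cons]
    rw [ih, inner_loop]
    have hc : (nos.any fun n => g.contains n) = (g.any fun c => nos.contains c) := by
      rw [Bool.eq_iff_iff]
      simp only [List.any_eq_true, List.contains_iff_mem]
      exact ⟨fun ⟨n, hn, hg⟩ => ⟨n, hg, hn⟩, fun ⟨c, hg, hn⟩ => ⟨c, hn, hg⟩⟩
    rw [hc]

-- B-side: membership in the inverted index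
theorem mem_inner_index (g : List Int) (i : Int) (d : PySem.Dict Int (List Int)) (c j : Int) :
    j ∈ (g.foldl (fun d2 clan => d2.insert clan (d2.getD clan [] ++ [i])) d).getD c []
      ↔ j ∈ d.getD c [] ∨ (c ∈ g ∧ j = i) := by
  induction g generalizing d with
  | nil => simp
  | cons x xs ih =>
    simp only [List.foldl_cons, ih, PySem.Dict.getD_insert, List.mem_cons]
    by_cases hx : c = x
    · subst hx
      simp
      tauto
    · simp only [if_neg hx]
      tauto

theorem mem_buildIndex (sk : List (List Int)) (c j : Int) :
    j ∈ (buildIndex sk).getD c []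
      ↔ ∃ k : Nat, k < sk.length ∧ j = (k : Int) ∧ c ∈ sk.getD k [] := by
  induction sk using List.reverseRecOn with
  | nil =>
    unfold buildIndex
    simp [PySem.List.enumerate_nil, PySem.Dict.getD_empty]
  | append_singleton sk g ih =>
    unfold buildIndex at ih ⊢
    rw [PySem.List.enumerate_append, List.foldl_append]
    simp only [PySem.List.enumerate_cons, PySem.List.enumerate_nil,
      List.foldl_cons, List.foldl_nil]
    rw [mem_inner_index]
    rw [ih]
    constructor
    · rintro (⟨k, hk, hj, hc⟩ | ⟨hc, hj⟩)
      · exact ⟨k, by simp; omega, hj, by rw [List.getD_append _ _ _ _ hk]; exact hc⟩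
      · refine ⟨sk.length, by simp, by simpa using hj, ?_⟩
        simpa [List.getD] using hc
    · rintro ⟨k, hk, hj, hc⟩
      simp only [List.length_append, List.length_singleton] at hk
      by_cases hlt : k < sk.length
      · exact Or.inl ⟨k, hlt, hj, by rwa [List.getD_append _ _ _ _ hlt] at hc⟩
      · have hk' : k = sk.length := by omega
        subst hk'
        refine Or.inr ⟨?_, by simpa using hj⟩
        simpa [List.getD] using hc

-- B-side: membership in hit
theorem mem_hit (nos : List Int) (index : PySem.Dict Int (List Int)) (h0 : PySem.Set Int) (j : Int) :
    j ∈ nos.foldl (fun h n => PySem.Set.update h (index.getD n [])) h0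
      ↔ j ∈ h0 ∨ ∃ c ∈ nos, j ∈ index.getD c [] := by
  induction nos generalizing h0 with
  | nil => simp
  | cons n ns ih =>
    simp only [List.foldl_cons, ih, PySem.Set.mem_update, List.mem_cons]
    constructor
    · rintro ((hj | hj) | ⟨c, hc, hj⟩)
      · exact Or.inl hj
      · exact Or.inr ⟨n, Or.inl rfl, hj⟩
      · exact Or.inr ⟨c, Or.inr hc, hj⟩
    · rintro (hj | ⟨c, (rfl | hc), hj⟩)
      · exact Or.inl (Or.inl hj)
      · exact Or.inl (Or.inr hj)
      · exact Or.inr ⟨c, hc, hj⟩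

theorem nodup_hit (nos : List Int) (index : PySem.Dict Int (List Int)) (h0 : PySem.Set Int)
    (hh : h0.Nodup) :
    (nos.foldl (fun h n => PySem.Set.update h (index.getD n [])) h0).Nodup := by
  induction nos generalizing h0 with
  | nil => exact hh
  | cons n ns ih =>
    exact ih _ (PySem.Set.nodup_update _ _ hh)

-- B-side: sorted hit = the ascending list of hit-group indices
theorem sorted_hit (sk : List (List Int)) (nos : List Int) :
    PySem.List.sorted
      (nos.foldl (fun h n => PySem.Set.update h ((buildIndex sk).getD n [])) PySem.Set.empty)
      (fun x => x) false
    = ((List.range sk.length).filter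
        (fun k => nos.any (fun c => (sk.getD k []).contains c))).map (fun k => Int.ofNat k) := by
  have hpair : (((List.range sk.length).filter
      (fun k => nos.any (fun c => (sk.getD k []).contains c))).map
      (fun k => Int.ofNat k)).Pairwise (fun a b => a < b) := by
    rw [List.pairwise_map]
    exact ((List.pairwise_lt_range).filter _).imp (fun h => Int.ofNat_lt.mpr h)
  apply PySem.List.sorted_eq_of_perm_of_pairwise_lt _ _ _ _ hpair
  have hnodT : (((List.range sk.length).filter
      (fun k => nos.any (fun c => (sk.getD k []).contains c))).map
      (fun k => Int.ofNat k)).Nodup :=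
    hpair.imp (fun h => Int.ne_of_lt h)
  have hnodH := nodup_hit nos (buildIndex sk) PySem.Set.empty List.nodup_nil
  rw [List.perm_ext_iff_of_nodup hnodT hnodH]
  intro j
  rw [mem_hit]
  simp only [List.mem_map, List.mem_filter, List.mem_range, List.any_eq_true,
    List.contains_iff_mem, PySem.Set.empty, List.not_mem_nil, false_or]
  constructor
  · rintro ⟨k, ⟨hk, ⟨c, hc, hck⟩⟩, rfl⟩
    exact ⟨c, hc, (mem_buildIndex sk c k).mpr ⟨k, hk, rfl, hck⟩⟩
  · rintro ⟨c, hc, hj⟩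
    rcases (mem_buildIndex sk c j).mp hj with ⟨k, hk, rfl, hck⟩
    exact ⟨k, ⟨hk, ⟨c, hc, hck⟩⟩, rfl⟩

-- B-side: the hit-index list maps to exactly the hit groups, in order
theorem map_filter_range (sk : List (List Int)) (p : List Int → Bool) :
    ((List.range sk.length).filter (fun k => p (sk.getD k []))).map (fun k => sk.getD k [])
      = sk.filter p := by
  induction sk using List.reverseRecOn with
  | nil => simp
  | append_singleton sk g ih =>
    have h1 : ∀ k ∈ List.range sk.length, (sk ++ [g]).getD k [] = sk.getD k [] :=
      fun k hk => List.getD_append _ _ _ _ (List.mem_range.mp hk)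
    have hg : (sk ++ [g]).getD sk.length [] = g := by
      simp [List.getD]
    simp only [List.length_append, List.length_singleton, List.range_succ,
      List.filter_append, List.map_append]
    rw [List.filter_congr (fun k hk => by rw [h1 k hk])]
    rw [List.map_congr_left (fun k hk => h1 k (List.mem_of_mem_filter hk))]
    rw [ih]
    simp only [List.filter_cons, List.filter_nil, hg]
    by_cases hpg : p g = true
    · simp [hpg]
    · simp [Bool.eq_false_iff.mpr hpg]

theorem result_loop (sk : List (List Int)) (nos : List Int) :
    (((List.range sk.length).filter
        (fun k => nos.any (fun c => (sk.getD k []).contains c))).map (fun k => Int.ofNat k)).foldl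
      (fun r i => PySem.Set.update r ((PySem.List.pyGet? sk i).getD [])) PySem.Set.empty
    = sk.foldl (fun r g => if g.any (fun c => nos.contains c)
        then PySem.Set.update r g else r) PySem.Set.empty := by
  rw [List.foldl_map]
  rw [PySem.List.foldl_congr_mem (g := fun r k => PySem.Set.update r (sk.getD k []))
    (h := by
      intro acc k hk
      have hlt : k < sk.length := List.mem_range.mp (List.mem_of_mem_filter hk)
      have : PySem.List.pyGet? sk (Int.ofNat k) = some sk[k] := by
        simp [PySem.List.pyGet?_natCast, List.getElem?_eq_getElem hlt]
      rw [this]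
      simp [List.getD, List.getElem?_eq_getElem hlt])]
  rw [← List.foldl_map (f := fun k => sk.getD k [])
      (g := fun r g => PySem.Set.update r g)]
  have hm := map_filter_range sk (fun g => nos.any (fun c => g.contains c))
  simp only at hm
  rw [hm, ← PySem.List.foldl_if_eq_foldl_filter]
  apply PySem.List.foldl_congr_mem
  intro acc g _
  have hc : (nos.any fun c => g.contains c) = (g.any fun c => nos.contains c) := by
    rw [Bool.eq_iff_iff]
    simp only [List.any_eq_true, List.contains_iff_mem]
    exact ⟨fun ⟨n, hn, hg⟩ => ⟨n, hg, hn⟩, fun ⟨c, hg, hn⟩ => ⟨c, hn, hg⟩⟩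
  rw [hc]

-- ===== VERDICT (by name: the statement is the Claim_ definition above) =====
theorem okuzeni_spec : Claim_equal_okuzeni := by
  intro sk nos _
  unfold Spec_okuzeni okuzeni okuzeni_alt
  by_cases h : nos = []
  · subst h; rfl
  · have hlen : (nos.length == 0) = false := by
      simp [List.length_eq_zero_iff, h]
    simp only [hlen, Bool.false_eq_true, if_false]
    rw [outer_loop]
    show _ = PySem.Set.diff _ nos
    rw [show (PySem.List.enumerate sk).foldl (fun d p =>
        p.2.foldl (fun d2 clan => d2.insert clan (d2.getD clan [] ++ [p.1])) d)
        PySem.Dict.empty = buildIndex sk from rfl]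
    rw [sorted_hit, result_loop]
    rfl
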